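-- pv_equiv track=rewrite | github.com/ysangkok/python-bitcoinlib | bitcointx/core/scripteval.py | _CastToBool
-- ===== SOURCE A (Python) =====
-- def _CastToBool(s):
--     for i in range(len(s)):
--         sv = s[i]
--         if sv != 0:
--             if (i == (len(s) - 1)) and (sv == 0x80):
--                 return False
--             return True
--
--     return False
-- ===== SOURCE B (Python) =====
-- def _CastToBool(s):
--     if not s:
--         return False
--     nz = sum(1 for v in s if v != 0)
--     if nz == 0:
--         return False
--     if nz == 1 and s[-1] == 0x80:
--         return False
--     return True
-- ===== Notes on version B (the rewrite author's own statement) =====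
-- stated objective: alternative
-- what changed: Replaces A's positional early-exit scan (with the last-byte/0x80 check embedded at the first nonzero) by a one-pass nonzero count followed by a closed-form verdict: false iff the count is 0, or the count is 1 and the last byte is 0x80.
import Mathlib
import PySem

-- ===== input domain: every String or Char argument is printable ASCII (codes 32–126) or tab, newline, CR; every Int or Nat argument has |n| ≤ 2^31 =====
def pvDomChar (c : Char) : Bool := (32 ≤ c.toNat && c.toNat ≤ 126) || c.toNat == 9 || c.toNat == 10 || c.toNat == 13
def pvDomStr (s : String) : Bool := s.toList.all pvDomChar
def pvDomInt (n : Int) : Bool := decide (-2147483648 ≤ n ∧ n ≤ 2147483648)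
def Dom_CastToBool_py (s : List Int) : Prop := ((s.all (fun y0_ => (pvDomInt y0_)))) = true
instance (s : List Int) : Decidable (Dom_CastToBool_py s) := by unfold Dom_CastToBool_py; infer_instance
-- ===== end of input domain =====

-- B replaces A's indexed early-exit scan (with its embedded last-byte/0x80 special case) by a
-- full-pass nonzero count plus a closed-form verdict on the count and the last byte (objective: alternative).


-- ===== PORT A =====
-- loop 'for i in range(len(s))' with early returns, as index recursion
def CastToBool_py_go (s : List Int) (i : Nat) : Bool :=
  if h : i < s.length then
    let sv := s[i]
    if sv ≠ 0 then
      if i = s.length - 1 ∧ sv = 0x80 then false else true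
    else CastToBool_py_go s (i + 1)
  else false
termination_by s.length - i

def CastToBool_py (s : List Int) : Bool := CastToBool_py_go s 0

-- ===== PORT B =====
-- B: count the nonzero bytes in one full pass, then decide from the count and the last byte
def CastToBool_py_alt (s : List Int) : Bool :=
  if s.isEmpty then false
  else
    let nz := s.countP (fun v => v != 0)
    if nz == 0 then false
    else if nz == 1 && s.getLast! == (0x80 : Int) then false
    else true

-- ===== PRECONDITION & SPEC =====
def Spec_CastToBool_py (s : List Int) (out : Bool) : Prop := out = CastToBool_py_alt s
instance (s : List Int) (out : Bool) : Decidable (Spec_CastToBool_py s out) := by unfold Spec_CastToBool_py; infer_instance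

-- ===== CLAIM (what is proved, stated in full; the proofs are below) =====
def Claim_equal_CastToBool_py : Prop := ∀ (s : List Int), Dom_CastToBool_py s → Spec_CastToBool_py s (CastToBool_py s)

-- ===== LEMMAS AND PROOFS =====

lemma go_eq_alt_drop (s : List Int) (i : Nat) :
    CastToBool_py_go s i = CastToBool_py_alt (s.drop i) := by
  induction i using CastToBool_py_go.induct (s := s) with
  | case1 i h sv hsv hlast =>
    have hsv' : ¬ s[i] = (0 : Int) := hsv
    have hlast' : i = s.length - 1 ∧ s[i] = (128 : Int) := hlast
    have hdrop : s.drop (i + 1) = [] := List.drop_eq_nil_of_le (by omega)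
    have hsingle : s.drop i = [s[i]] := by
      rw [List.drop_eq_getElem_cons h, hdrop]
    rw [CastToBool_py_go]
    simp only [h, dif_pos, ne_eq]
    rw [if_pos hsv', if_pos hlast', hsingle]
    simp [CastToBool_py_alt, hlast'.2, List.getLast!]
  | case2 i h sv hsv hnl =>
    have hsv' : ¬ s[i] = (0 : Int) := hsv
    have hnl' : ¬(i = s.length - 1 ∧ s[i] = (128 : Int)) := hnl
    rw [CastToBool_py_go]
    simp only [h, dif_pos, ne_eq]
    rw [if_pos hsv', if_neg hnl']
    by_cases hl : i = s.length - 1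
    · -- i is the last index: the suffix is the single nonzero byte s[i] ≠ 0x80
      have hdrop : s.drop (i + 1) = [] := List.drop_eq_nil_of_le (by omega)
      have h80 : ¬ s[i] = (128 : Int) := fun hc => hnl' ⟨hl, hc⟩
      have hsingle : s.drop i = [s[i]] := by
        rw [List.drop_eq_getElem_cons h, hdrop]
      rw [hsingle]
      simp [CastToBool_py_alt, hsv', h80, List.getLast!]
    · -- a nonzero strictly before the last index: either the count is ≥ 2, or it is 1
      -- and every later byte (so in particular the last) is 0, so the 0x80 test fails
      have hne : s.drop (i + 1) ≠ [] := by
        simp only [ne_eq, List.drop_eq_nil_iff]; omega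
      rw [List.drop_eq_getElem_cons h]
      simp only [CastToBool_py_alt, List.isEmpty_cons, List.countP_cons]
      by_cases hz : (s.drop (i+1)).countP (fun v => v != 0) = 0
      · -- all later bytes are zero, so the last byte is 0 ≠ 0x80
        have hall : ∀ x ∈ s.drop (i+1), x = 0 := by
          intro x hx
          by_contra hx0
          have : 0 < (s.drop (i+1)).countP (fun v => v != 0) :=
            List.countP_pos_iff.mpr ⟨x, hx, by simpa using hx0⟩
          omega
        have hlast0 : (s.drop (i+1)).getLast hne = 0 := hall _ (List.getLast_mem hne)
        have hq : (List.drop i s).getLast?.getD 0 = (0 : Int) := by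
          conv_lhs => rw [List.drop_eq_getElem_cons h]
          obtain ⟨y, u, hyu⟩ := List.exists_cons_of_ne_nil hne
          rw [hyu, List.getLast?_cons_cons, ← hyu,
            List.getLast?_eq_some_getLast hne, hlast0]
          rfl
        simp [hz, hq, hsv']
      · -- count ≥ 2
        simp [hsv', hz]
  | case3 i h sv hsv ih =>
    have h0 : s[i] = (0 : Int) := not_not.mp hsv
    rw [CastToBool_py_go]
    simp only [h, dif_pos, ne_eq]
    rw [if_neg (by simpa using hsv), ih]
    by_cases hne : s.drop (i + 1) = []
    · have hsingle : s.drop i = [s[i]] := by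
        rw [List.drop_eq_getElem_cons h, hne]
      rw [hne, hsingle]
      simp [CastToBool_py_alt, h0]
    · -- prepending a zero byte changes neither the count nor the last byte
      rw [List.drop_eq_getElem_cons h, h0]
      obtain ⟨y, u, hyu⟩ := List.exists_cons_of_ne_nil hne
      simp only [CastToBool_py_alt, List.isEmpty_cons, List.countP_cons, hyu,
        List.getLast?_cons_cons]
      simp [List.isEmpty_iff]
  | case4 i h =>
    have hdrop : s.drop i = [] := List.drop_eq_nil_of_le (by omega)
    rw [CastToBool_py_go]
    simp [CastToBool_py_alt, h, hdrop]

-- ===== VERDICT (by name: the statement is the Claim_ definition above) =====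
theorem CastToBool_py_spec : Claim_equal_CastToBool_py := by
  intro s _
  unfold Spec_CastToBool_py CastToBool_py
  simpa using go_eq_alt_drop s 0
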